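-- pv_equiv track=rewrite | github.com/ajolsson/advent-of-code-18 | Day5_2_1.py | remove_reactions
-- ===== SOURCE A (Python) =====
-- def remove_reactions(input, letter, iterations):
--     new_string = ""
--     iterations += 1
--     i = 0
--     while i < len(input):
--         if i < len(input) - 1 and input[i] != input[i + 1] and input[i].upper() == input[i + 1].upper():
--             i += 2
--         else:
--             if input[i].upper() != letter:
--                 new_string += input[i]
--             i += 1
--
--     return new_string, iterations
-- ===== SOURCE B (Python) =====
-- def remove_reactions(input, letter, iterations):
--     # Table-based staged computation instead of a scanning loop:
--     # pair[i] marks a reactive adjacent pair; the recurrence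
--     # start[i] = pair[i] and not start[i-1] resolves the greedy
--     # non-overlapping choice; a char survives iff no chosen pair covers it.
--     pair = [a != b and a.upper() == b.upper() for a, b in zip(input, input[1:])]
--     start = []
--     prev = False
--     for p in pair:
--         prev = p and not prev
--         start.append(prev)
--     covered = [a or b for a, b in zip(start + [False], [False] + start)]
--     new_string = ''.join(c for c, cov in zip(input, covered)
--                          if not cov and c.upper() != letter)
--     return new_string, iterations + 1
-- ===== Notes on version B (the rewrite author's own statement) =====
-- stated objective: faster
-- what changed: Replaces A's index-jump scanning loop (i += 2 on reaction, interleaved letter filter, string +=) by staged table passes: a pair-reactivity table over adjacent char pairs, the recurrence start[i] = pair[i] and not start[i-1] resolving the greedy non-overlapping removal, and a final comprehension keeping uncovered chars whose upper() differs from letter.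
import Mathlib
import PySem

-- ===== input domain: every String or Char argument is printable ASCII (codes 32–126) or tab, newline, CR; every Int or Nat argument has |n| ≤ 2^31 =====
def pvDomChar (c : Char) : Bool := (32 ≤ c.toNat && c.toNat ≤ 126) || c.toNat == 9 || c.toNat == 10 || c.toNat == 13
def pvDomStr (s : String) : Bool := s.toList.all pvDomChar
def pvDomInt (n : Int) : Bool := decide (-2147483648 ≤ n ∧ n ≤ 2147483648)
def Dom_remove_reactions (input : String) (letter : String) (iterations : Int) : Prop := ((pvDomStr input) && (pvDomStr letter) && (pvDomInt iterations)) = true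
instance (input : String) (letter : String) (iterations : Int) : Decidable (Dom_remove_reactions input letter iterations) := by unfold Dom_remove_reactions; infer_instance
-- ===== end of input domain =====

-- B replaces A's index-jump scan by staged table passes (pair table, greedy-start recurrence, covered filter); alternative decomposition, return value only.


-- ===== PORT A =====
-- Python c.upper() on a single-character string (exact for the ASCII domain)
def pvUp1 (c : Char) : String := String.ofList [PySem.Chars.upperChar c]

-- A's while loop over the index i, transcribed as recursion on the suffix input[i:]:
-- the two-element pattern is A's 'i < len-1' lookahead, the react branch is 'i += 2',
-- the else branch appends the filtered char and is 'i += 1'.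
def removeLoopA (letter : String) : List Char → List Char
  | [] => []
  | [c] => if pvUp1 c ≠ letter then [c] else []
  | c1 :: c2 :: rest =>
    if c1 ≠ c2 ∧ PySem.Chars.upperChar c1 = PySem.Chars.upperChar c2 then
      removeLoopA letter rest
    else
      (if pvUp1 c1 ≠ letter then [c1] else []) ++ removeLoopA letter (c2 :: rest)

def remove_reactions (input : String) (letter : String) (iterations : Int) : String × Int :=
  (String.ofList (removeLoopA letter input.toList), iterations + 1)

-- ===== PORT B =====
-- Source B's pair comprehension body: a != b and a.upper() == b.upper()
def pvPairB (ab : Char × Char) : Bool :=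
  decide (ab.1 ≠ ab.2 ∧ PySem.Chars.upperChar ab.1 = PySem.Chars.upperChar ab.2)

-- Source B's 'for p in pair' loop building start with the running prev flag
def pvStartStep (st : List Bool × Bool) (p : Bool) : List Bool × Bool :=
  let prev := p && !st.2
  (st.1 ++ [prev], prev)

def remove_reactions_alt (input : String) (letter : String) (iterations : Int) : String × Int :=
  let l := input.toList
  let pair : List Bool := (l.zip l.tail).map pvPairB
  let start : List Bool := (pair.foldl pvStartStep ([], false)).1
  let covered : List Bool := ((start ++ [false]).zip (false :: start)).map (fun ab => ab.1 || ab.2)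
  let new_string : List Char :=
    (l.zip covered).filterMap (fun ccov =>
      if !ccov.2 && decide (pvUp1 ccov.1 ≠ letter) then some ccov.1 else none)
  (String.ofList new_string, iterations + 1)

-- ===== PRECONDITION & SPEC =====
def Spec_remove_reactions (input : String) (letter : String) (iterations : Int) (out : String × Int) : Prop := out = remove_reactions_alt input letter iterations
instance (input : String) (letter : String) (iterations : Int) (out : String × Int) : Decidable (Spec_remove_reactions input letter iterations out) := by unfold Spec_remove_reactions; infer_instance

-- ===== CLAIM =====
def Claim_equal_remove_reactions : Prop := ∀ (input : String) (letter : String) (iterations : Int), Dom_remove_reactions input letter iterations → Spec_remove_reactions input letter iterations (remove_reactions input letter iterations)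

-- ===== LEMMAS AND PROOFS =====

-- direct recursive form of Source B's start list (proof helper)
def scanStart (prev : Bool) : List Bool → List Bool
  | [] => []
  | p :: ps => let q := p && !prev; q :: scanStart q ps

lemma foldl_startStep (ps : List Bool) : ∀ (acc : List Bool) (prev : Bool),
    (ps.foldl pvStartStep (acc, prev)).1 = acc ++ scanStart prev ps := by
  induction ps with
  | nil => intro acc prev; simp [scanStart]
  | cons p ps ih =>
    intro acc prev
    simp [List.foldl_cons, pvStartStep, scanStart, ih]

-- direct recursive form of the whole B pipeline, with the preceding start bit prev (proof helper)
def pipeB (letter : String) (prev : Bool) : List Char → List Char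
  | [] => []
  | [c] => if !prev && decide (pvUp1 c ≠ letter) then [c] else []
  | c1 :: c2 :: rest =>
    let q := pvPairB (c1, c2) && !prev
    (if !(q || prev) && decide (pvUp1 c1 ≠ letter) then [c1] else []) ++ pipeB letter q (c2 :: rest)

-- B's zip/cover/filter chain equals pipeB, for any preceding start bit
lemma chainB (letter : String) (l : List Char) : ∀ (prev : Bool),
    (l.zip ((((scanStart prev ((l.zip l.tail).map pvPairB)) ++ [false]).zip
        (prev :: scanStart prev ((l.zip l.tail).map pvPairB))).map (fun ab => ab.1 || ab.2))).filterMap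
      (fun ccov => if !ccov.2 && decide (pvUp1 ccov.1 ≠ letter) then some ccov.1 else none)
      = pipeB letter prev l := by
  induction l with
  | nil => intro prev; simp [scanStart, pipeB]
  | cons c1 l ih =>
    intro prev
    cases l with
    | nil =>
      cases prev <;> by_cases h : pvUp1 c1 ≠ letter <;>
        simp [scanStart, pipeB, h]
    | cons c2 rest =>
      have hrec := ih (pvPairB (c1, c2) && !prev)
      simp only [List.tail_cons] at hrec
      simp only [List.tail_cons, List.zip_cons_cons, List.map_cons, scanStart,
        List.cons_append, List.filterMap_cons, pipeB]
      rw [hrec]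
      cases hb : (!(pvPairB (c1, c2) && !prev || prev) && decide (pvUp1 c1 ≠ letter)) <;>
        cases hq : pvPairB (c1, c2) && !prev <;> cases prev <;> simp_all

-- after a chosen pair, the next char is covered and its own start is suppressed
lemma pipeB_true (letter : String) (c : Char) (l : List Char) :
    pipeB letter true (c :: l) = pipeB letter false l := by
  cases l with
  | nil => simp [pipeB]
  | cons c2 rest => simp [pipeB]

-- the pipeline with no pending start equals A's loop
lemma pipeB_eq_loopA (letter : String) (l : List Char) :
    pipeB letter false l = removeLoopA letter l := by
  induction l using removeLoopA.induct letter with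
  | case1 => simp [pipeB, removeLoopA]
  | case2 c h => simp [pipeB, removeLoopA, h]
  | case3 c h => simp [pipeB, removeLoopA, h]
  | case4 c1 c2 rest h ih =>
    have hp : pvPairB (c1, c2) = true := by simp [pvPairB, h.1, h.2]
    simp [pipeB, removeLoopA, h, hp, pipeB_true, ih]
  | case5 c1 c2 rest h ih =>
    have hp : pvPairB (c1, c2) = false := by
      simp only [pvPairB, decide_eq_false_iff_not]
      exact h
    by_cases hk : pvUp1 c1 ≠ letter <;>
      simp [pipeB, removeLoopA, h, hp, hk, ih]

-- ===== VERDICT =====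
theorem remove_reactions_spec : Claim_equal_remove_reactions := by
  intro input letter iterations _
  unfold Spec_remove_reactions remove_reactions remove_reactions_alt
  simp only [foldl_startStep, List.nil_append]
  rw [chainB, pipeB_eq_loopA]
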